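-- pv_equiv track=rewrite | github.com/StevenXoFk/Tarea-taller-Tkinter | convertidor.py | base4_a_base10
-- ===== SOURCE A (Python) =====
-- def base4_a_base10(numero):
--     res = 0
--     exponentee = 0
--     base10 = ""
--
--
--     diles = "0123456789ABCDEF"
--
--     while numero > 0:
--         nuevo = numero % 10
--         res += nuevo * (4 ** exponentee)
--         numero //= 10
--         exponentee += 1
--
--     while res > 0:
--         todo = res % 10
--         base10 = diles[todo] + base10
--         res //= 10
--
--     return base10
-- ===== SOURCE B (Python) =====
-- def base4_a_base10(numero):
--     # Horner's rule over the decimal digits of `numero`, read left-to-right as base-4 digits.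
--     if numero <= 0:
--         return ""
--     res = 0
--     for ch in str(numero):
--         res = res * 4 + int(ch)
--     return str(res)
-- ===== Notes on version B (the rewrite author's own statement) =====
-- stated objective: simpler
-- what changed: B guards non-positive input, then converts with a single left-to-right Horner pass over str(numero) (res = res*4 + int(ch)) and returns str(res), replacing A's two explicit digit-extraction loops with %10, 4**exponent accumulation and manual table-indexed string building.
import Mathlib
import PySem

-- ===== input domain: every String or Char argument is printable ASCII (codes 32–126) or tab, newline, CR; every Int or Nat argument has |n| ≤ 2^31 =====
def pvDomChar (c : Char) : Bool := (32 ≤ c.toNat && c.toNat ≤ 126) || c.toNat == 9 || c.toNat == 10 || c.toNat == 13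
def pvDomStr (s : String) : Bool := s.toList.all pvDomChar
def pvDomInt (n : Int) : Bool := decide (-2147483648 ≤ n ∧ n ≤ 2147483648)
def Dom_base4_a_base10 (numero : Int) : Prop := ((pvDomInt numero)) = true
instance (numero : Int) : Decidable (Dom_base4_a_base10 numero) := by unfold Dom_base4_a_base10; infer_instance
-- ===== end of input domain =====

-- B replaces A's two digit-extraction loops (%10 with 4**exponent accumulation, then manual
-- table-indexed string building) by one Horner pass over str(numero) followed by str(res): simpler.


-- ===== PORT A =====
def pvDiles : String := "0123456789ABCDEF"

-- first while loop: extract decimal digits of `numero` (LSB first), accumulate digit * 4**exponentee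
def pvALoop1 (numero res : Int) (exponentee : Nat) : Int :=
  if 0 < numero then
    pvALoop1 (PySem.Int.floordiv numero 10)
      (res + (PySem.Int.mod numero 10) * 4 ^ exponentee) (exponentee + 1)
  else res
termination_by numero.toNat
decreasing_by
  rw [PySem.Int.floordiv_eq_ediv_of_pos (by omega)]; omega

-- second while loop: prepend diles[res % 10]; the index is always in range (0 ≤ res % 10 < 10),
-- so the `none` (IndexError) arm of pyGet? is unreachable
def pvALoop2 (res : Int) (base10 : String) : String :=
  if 0 < res then
    pvALoop2 (PySem.Int.floordiv res 10)
      ((((PySem.Str.pyGet? pvDiles (PySem.Int.mod res 10)).map String.singleton).getD "") ++ base10)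
  else base10
termination_by res.toNat
decreasing_by
  rw [PySem.Int.floordiv_eq_ediv_of_pos (by omega)]; omega

def base4_a_base10 (numero : Int) : String :=
  pvALoop2 (pvALoop1 numero 0 0) ""

-- ===== PORT B =====
-- res = res * 4 + int(ch); `ch` is one decimal digit of str(numero), so int() never fails
def pvHorner (res : Int) (c : Char) : Int :=
  res * 4 + (PySem.Int.ofStr? (String.singleton c)).getD 0

def base4_a_base10_alt (numero : Int) : String :=
  if numero ≤ 0 then ""
  else PySem.Int.toStr ((PySem.Int.toStr numero).toList.foldl pvHorner 0)

-- ===== PRECONDITION & SPEC =====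
def Spec_base4_a_base10 (numero : Int) (out : String) : Prop := out = base4_a_base10_alt numero
instance (numero : Int) (out : String) : Decidable (Spec_base4_a_base10 numero out) := by unfold Spec_base4_a_base10; infer_instance

-- ===== CLAIM (what is proved, stated in full; the proofs are below) =====
def Claim_equal_base4_a_base10 : Prop := ∀ (numero : Int), Dom_base4_a_base10 numero → Spec_base4_a_base10 numero (base4_a_base10 numero)

-- ===== LEMMAS AND PROOFS =====

-- decimal digit characters of n, MSB first (the common shape of both string conversions)
def pvDigits (n : Nat) : List Char :=
  if n < 10 then [Nat.digitChar n]
  else pvDigits (n / 10) ++ [Nat.digitChar (n % 10)]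
decreasing_by omega

-- value of the decimal digits of n read as base-4 digits (LSB-weighted)
def pvVal (n : Nat) : Int :=
  if n = 0 then 0 else ((n % 10 : Nat) : Int) + 4 * pvVal (n / 10)
decreasing_by omega

theorem pvToDigitsCore_eq (fuel : Nat) : ∀ n ds, n < fuel →
    Nat.toDigitsCore 10 fuel n ds = pvDigits n ++ ds := by
  induction fuel with
  | zero => intro n ds h; omega
  | succ fuel ih =>
    intro n ds h
    rw [Nat.toDigitsCore]
    by_cases h10 : n < 10
    · have : n / 10 = 0 := by omega
      simp only [this, if_pos rfl]
      rw [pvDigits, if_pos h10]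
      have : n % 10 = n := by omega
      simp [this]
    · have hd : ¬ n / 10 = 0 := by omega
      simp only [if_neg hd]
      rw [ih (n / 10) _ (by omega)]
      conv_rhs => rw [pvDigits]
      rw [if_neg h10]
      simp

theorem pvToDigits_eq (n : Nat) : Nat.toDigits 10 n = pvDigits n := by
  rw [Nat.toDigits, pvToDigitsCore_eq (n + 1) n [] (by omega)]; simp

theorem pvToStr_eq (n : Int) (h : 0 ≤ n) :
    PySem.Int.toStr n = String.ofList (pvDigits n.toNat) := by
  simp only [PySem.Int.toStr, PySem.Int.toChars, if_neg (by omega : ¬ n < 0), pvToDigits_eq]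

theorem pvMod_toNat (n : Int) (h : 0 < n) : PySem.Int.mod n 10 = ((n.toNat % 10 : Nat) : Int) := by
  rw [PySem.Int.mod_eq_emod_of_pos (by omega)]; omega

theorem pvDiv_toNat (n : Int) (h : 0 < n) : PySem.Int.floordiv n 10 = ((n.toNat / 10 : Nat) : Int) := by
  rw [PySem.Int.floordiv_eq_ediv_of_pos (by omega)]; omega

-- A's first loop computes pvVal
theorem pvALoop1_eq (k : Nat) : ∀ (n r : Int) (e : Nat), n.toNat ≤ k →
    pvALoop1 n r e = r + pvVal n.toNat * 4 ^ e := by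
  induction k with
  | zero =>
    intro n r e h
    rw [pvALoop1, if_neg (by omega)]
    have : n.toNat = 0 := by omega
    rw [this, pvVal]; simp
  | succ k ih =>
    intro n r e h
    by_cases hp : 0 < n
    · rw [pvALoop1, if_pos hp, pvDiv_toNat n hp, pvMod_toNat n hp,
        ih _ _ _ (by simp; omega)]
      simp only [Int.toNat_natCast]
      conv_rhs => rw [pvVal]
      rw [if_neg (by omega : ¬ n.toNat = 0)]
      push_cast
      ring
    · rw [pvALoop1, if_neg hp]
      have : n.toNat = 0 := by omega
      rw [this, pvVal]; simp

theorem pvVal_pos (n : Nat) (h : 0 < n) : 0 < pvVal n := by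
  induction n using Nat.strong_induction_on with
  | _ n ih =>
    rw [pvVal, if_neg (by omega)]
    by_cases h10 : n < 10
    · have : n / 10 = 0 := by omega
      rw [this, pvVal]; simp; omega
    · have := ih (n / 10) (by omega) (by omega)
      omega

theorem pvDigit_get (d : Nat) (h : d < 10) :
    PySem.Str.pyGet? pvDiles ((d : Nat) : Int) = some (Nat.digitChar d) := by
  interval_cases d <;> decide

theorem pvDigit_int (d : Nat) (h : d < 10) :
    (PySem.Int.ofStr? (String.singleton (Nat.digitChar d))).getD 0 = (d : Int) := by
  interval_cases d <;> decide

theorem pvSingleton_append (c : Char) (l : List Char) :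
    String.singleton c ++ String.ofList l = String.ofList (c :: l) := by
  apply String.toList_injective; simp

-- A's second loop prints pvDigits
theorem pvALoop2_eq (k : Nat) : ∀ (res : Int) (acc : List Char), 0 < res → res.toNat ≤ k →
    pvALoop2 res (String.ofList acc) = String.ofList (pvDigits res.toNat ++ acc) := by
  induction k with
  | zero => intro res acc h hk; omega
  | succ k ih =>
    intro res acc h hk
    rw [pvALoop2, if_pos h, pvDiv_toNat res h, pvMod_toNat res h,
      pvDigit_get (res.toNat % 10) (by omega)]
    simp only [Option.map_some, Option.getD_some, pvSingleton_append]
    by_cases h10 : res.toNat < 10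
    · have hz : res.toNat / 10 = 0 := by omega
      rw [hz]
      rw [pvALoop2, if_neg (by omega)]
      rw [pvDigits, if_pos h10]
      have : res.toNat % 10 = res.toNat := by omega
      rw [this]; rfl
    · have hih := ih ((res.toNat / 10 : Nat) : Int) (Nat.digitChar (res.toNat % 10) :: acc)
        (by simp; omega) (by simp; omega)
      simp only [Int.toNat_natCast] at hih
      rw [hih]
      conv_rhs => rw [pvDigits]
      rw [if_neg h10]
      simp

-- B's Horner fold over the decimal digits computes pvVal
theorem pvHorner_eq (n : Nat) : List.foldl pvHorner 0 (pvDigits n) = pvVal n := by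
  induction n using Nat.strong_induction_on with
  | _ n ih =>
    by_cases h10 : n < 10
    · rw [pvDigits, if_pos h10]
      simp only [List.foldl_cons, List.foldl_nil, pvHorner]
      rw [pvDigit_int n h10]
      by_cases h0 : n = 0
      · subst h0; rw [pvVal]; simp
      · conv_rhs => rw [pvVal]
        rw [if_neg h0]
        have h1 : n % 10 = n := by omega
        have h2 : n / 10 = 0 := by omega
        rw [h1, h2]
        have hv0 : pvVal 0 = 0 := by rw [pvVal]; simp
        rw [hv0]; simp
    · rw [pvDigits, if_neg h10, List.foldl_append]
      simp only [List.foldl_cons, List.foldl_nil, pvHorner]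
      rw [ih (n / 10) (by omega), pvDigit_int (n % 10) (by omega)]
      conv_rhs => rw [pvVal]
      rw [if_neg (by omega : ¬ n = 0)]
      ring

theorem pvEmpty_ofList : ("" : String) = String.ofList [] := by
  apply String.toList_injective; simp

-- ===== VERDICT (by name: the statement is the Claim_ definition above) =====
theorem base4_a_base10_spec : Claim_equal_base4_a_base10 := by
  intro numero _
  unfold Spec_base4_a_base10 base4_a_base10 base4_a_base10_alt
  by_cases h : numero ≤ 0
  · rw [if_pos h]
    rw [pvALoop1_eq numero.toNat numero 0 0 (le_refl _)]
    have h0 : numero.toNat = 0 := by omega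
    have hv0 : pvVal 0 = 0 := by rw [pvVal]; simp
    rw [h0, hv0]
    simp only [zero_mul, zero_add]
    rw [pvALoop2, if_neg (by omega)]
  · rw [if_neg h]
    have hpos : 0 < numero := by omega
    rw [pvALoop1_eq numero.toNat numero 0 0 (le_refl _)]
    simp only [pow_zero, mul_one, zero_add]
    have hv : 0 < pvVal numero.toNat := pvVal_pos numero.toNat (by omega)
    rw [pvEmpty_ofList, pvALoop2_eq (pvVal numero.toNat).toNat _ _ hv (le_refl _),
      List.append_nil]
    rw [pvToStr_eq numero (by omega)]
    simp only [String.toList_ofList]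
    rw [pvHorner_eq, pvToStr_eq (pvVal numero.toNat) (by omega)]
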